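-- pv_equiv track=rewrite | github.com/Hubble3/MadApes_Forwarder | madapes/services/pattern_service.py | pattern_risk_level
-- ===== SOURCE A (Python) =====
-- from typing import List, Optional
--
-- def pattern_risk_level(patterns: List[str]) -> str:
--     """Assess overall risk level from detected patterns."""
--     high_risk = {"pump_and_dump", "liquidity_drain", "possible_wash_trading"}
--     medium_risk = {"possible_dump", "liquidity_declining", "possible_reversal", "low_liq_ratio"}
--
--     if any(p in high_risk for p in patterns):
--         return "HIGH"
--     if any(p in medium_risk for p in patterns):
--         return "MEDIUM"
--     return "LOW"
-- ===== SOURCE B (Python) =====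
-- def pattern_risk_level(patterns):
--     """Assess overall risk level from detected patterns."""
--     severity = {
--         "pump_and_dump": 2,
--         "liquidity_drain": 2,
--         "possible_wash_trading": 2,
--         "possible_dump": 1,
--         "liquidity_declining": 1,
--         "possible_reversal": 1,
--         "low_liq_ratio": 1,
--     }
--     rank = max((severity.get(p, 0) for p in patterns), default=0)
--     return ["LOW", "MEDIUM", "HIGH"][rank]
-- ===== Notes on version B (the rewrite author's own statement) =====
-- stated objective: alternative
-- what changed: Replaces the two priority-ordered any()-membership scans with a single max-reduction of per-pattern severity ranks from one lookup table, indexed into a level list at the end.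
import Mathlib
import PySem

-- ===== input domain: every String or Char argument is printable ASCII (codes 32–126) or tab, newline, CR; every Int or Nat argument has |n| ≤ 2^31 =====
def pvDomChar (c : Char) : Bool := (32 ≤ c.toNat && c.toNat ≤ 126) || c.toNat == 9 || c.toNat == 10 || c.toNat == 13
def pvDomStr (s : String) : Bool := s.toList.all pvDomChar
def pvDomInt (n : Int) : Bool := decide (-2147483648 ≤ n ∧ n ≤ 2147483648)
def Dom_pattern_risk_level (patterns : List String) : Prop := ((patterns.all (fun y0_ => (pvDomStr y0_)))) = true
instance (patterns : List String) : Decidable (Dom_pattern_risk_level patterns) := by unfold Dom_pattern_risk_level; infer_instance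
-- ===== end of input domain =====

-- B replaces A's two priority-ordered any() membership scans by one max-reduction over a
-- severity lookup table, indexed into a level list at the end (objective: alternative).

-- ===== PORT A =====
def pattern_risk_level (patterns : List String) : String :=
  let high_risk : PySem.Set String :=
    PySem.Set.ofList ["pump_and_dump", "liquidity_drain", "possible_wash_trading"]
  let medium_risk : PySem.Set String :=
    PySem.Set.ofList ["possible_dump", "liquidity_declining", "possible_reversal", "low_liq_ratio"]
  if patterns.any (fun p => PySem.Set.contains high_risk p) then "HIGH"
  else if patterns.any (fun p => PySem.Set.contains medium_risk p) then "MEDIUM"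
  else "LOW"

-- ===== PORT B =====
def pvSeverity : PySem.Dict String Int :=
  PySem.Dict.ofList
    [("pump_and_dump", 2), ("liquidity_drain", 2), ("possible_wash_trading", 2),
     ("possible_dump", 1), ("liquidity_declining", 1), ("possible_reversal", 1),
     ("low_liq_ratio", 1)]

def pattern_risk_level_alt (patterns : List String) : String :=
  let rank : Int :=
    PySem.List.maxD (patterns.map (fun p => PySem.Dict.getD pvSeverity p 0)) (fun x => x) 0
  -- rank ∈ {0,1,2} (proved below), so the Python index ["LOW","MEDIUM","HIGH"][rank] never raises
  (PySem.List.pyGet? ["LOW", "MEDIUM", "HIGH"] rank).getD ""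

-- ===== PRECONDITION & SPEC =====
def Spec_pattern_risk_level (patterns : List String) (out : String) : Prop := out = pattern_risk_level_alt patterns
instance (patterns : List String) (out : String) : Decidable (Spec_pattern_risk_level patterns out) := by unfold Spec_pattern_risk_level; infer_instance

-- ===== CLAIM (what is proved, stated in full; the proofs are below) =====
def Claim_equal_pattern_risk_level : Prop := ∀ (patterns : List String), Dom_pattern_risk_level patterns → Spec_pattern_risk_level patterns (pattern_risk_level patterns)

-- ===== LEMMAS AND PROOFS =====

-- the severity rank of one pattern, as B looks it up
def pvSev (p : String) : Int := PySem.Dict.getD pvSeverity p 0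

-- A's two membership tests, named
def pvHighB (p : String) : Bool :=
  PySem.Set.contains (PySem.Set.ofList ["pump_and_dump", "liquidity_drain", "possible_wash_trading"]) p
def pvMedB (p : String) : Bool :=
  PySem.Set.contains (PySem.Set.ofList ["possible_dump", "liquidity_declining", "possible_reversal", "low_liq_ratio"]) p

theorem pv_A_eq (patterns : List String) :
    pattern_risk_level patterns =
      (if patterns.any pvHighB then "HIGH" else if patterns.any pvMedB then "MEDIUM" else "LOW") := rfl

-- the running max B reduces to (0 for the empty list, since all ranks are ≥ 0)
def pvRank (patterns : List String) : Int := (patterns.map pvSev).foldl max 0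

-- pointwise: B's table lookup agrees with A's two set-membership tests
theorem pv_sev_cases (p : String) :
    pvSev p = (if pvHighB p then 2 else if pvMedB p then 1 else 0) := by
  simp only [pvHighB, pvMedB]
  by_cases h1 : p = "pump_and_dump"; · subst h1; decide
  by_cases h2 : p = "liquidity_drain"; · subst h2; decide
  by_cases h3 : p = "possible_wash_trading"; · subst h3; decide
  by_cases h4 : p = "possible_dump"; · subst h4; decide
  by_cases h5 : p = "liquidity_declining"; · subst h5; decide
  by_cases h6 : p = "possible_reversal"; · subst h6; decide
  by_cases h7 : p = "low_liq_ratio"; · subst h7; decide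
  have hd : pvSeverity = PySem.Dict.mk
    [("pump_and_dump", 2), ("liquidity_drain", 2), ("possible_wash_trading", 2),
     ("possible_dump", 1), ("liquidity_declining", 1), ("possible_reversal", 1),
     ("low_liq_ratio", 1)] := by decide
  have hs : PySem.Set.ofList ["pump_and_dump", "liquidity_drain", "possible_wash_trading"] = ["pump_and_dump", "liquidity_drain", "possible_wash_trading"] := by decide
  have hm : PySem.Set.ofList ["possible_dump", "liquidity_declining", "possible_reversal", "low_liq_ratio"] = ["possible_dump", "liquidity_declining", "possible_reversal", "low_liq_ratio"] := by decide
  rw [pvSev, hd]; simp only [hs, hm]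
  simp only [PySem.Dict.getD, PySem.Dict.get?, PySem.Set.contains]
  have e1 : ("pump_and_dump" == p) = false := by simp [beq_eq_false_iff_ne]; exact Ne.symm h1
  have e2 : ("liquidity_drain" == p) = false := by simp [beq_eq_false_iff_ne]; exact Ne.symm h2
  have e3 : ("possible_wash_trading" == p) = false := by simp [beq_eq_false_iff_ne]; exact Ne.symm h3
  have e4 : ("possible_dump" == p) = false := by simp [beq_eq_false_iff_ne]; exact Ne.symm h4
  have e5 : ("liquidity_declining" == p) = false := by simp [beq_eq_false_iff_ne]; exact Ne.symm h5
  have e6 : ("possible_reversal" == p) = false := by simp [beq_eq_false_iff_ne]; exact Ne.symm h6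
  have e7 : ("low_liq_ratio" == p) = false := by simp [beq_eq_false_iff_ne]; exact Ne.symm h7
  simp [List.find?, e1, e2, e3, e4, e5, e6, e7, h1, h2, h3, h4, h5, h6, h7]

theorem pv_sev_nonneg (p : String) : 0 ≤ pvSev p := by
  rw [pv_sev_cases p]; split_ifs <;> omega

theorem pv_sev_le_two (p : String) : pvSev p ≤ 2 := by
  rw [pv_sev_cases p]; split_ifs <;> omega

-- max?'s fold with a some-accumulator is the plain running max
theorem pv_max_acc (xs : List Int) (m : Int) :
    PySem.List.max? (m :: xs) (fun y : Int => y) = some (xs.foldl max m) := by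
  induction xs generalizing m with
  | nil => rfl
  | cons x t ih =>
      have hx : (if m < x then some x else some m) = some (max m x) := by
        split_ifs <;> simp <;> omega
      have h1 : PySem.List.max? (m :: x :: t) (fun y : Int => y) =
          PySem.List.max? (max m x :: t) (fun y : Int => y) := by
        simp only [PySem.List.max?, List.foldl, hx]
      rw [h1, ih]
      simp [List.foldl]

-- B's rank is the running max pvRank
theorem pv_rank_eq (patterns : List String) :
    PySem.List.maxD (patterns.map (fun p => PySem.Dict.getD pvSeverity p 0)) (fun x => x) 0 =
      pvRank patterns := by
  cases patterns with
  | nil => rfl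
  | cons p t =>
      show (PySem.List.max? (pvSev p :: t.map pvSev) (fun x => x)).getD 0 = pvRank (p :: t)
      rw [pv_max_acc (t.map pvSev) (pvSev p)]
      have h0 : max 0 (pvSev p) = pvSev p := max_eq_right (pv_sev_nonneg p)
      simp [pvRank, h0]

theorem pv_rank_le_two (patterns : List String) : pvRank patterns ≤ 2 := by
  rcases PySem.List.foldl_max_mem (patterns.map pvSev) 0 with h | h
  · rw [pvRank, h]; omega
  · rw [pvRank]
    rcases List.mem_map.mp h with ⟨p, _, hp⟩
    rw [← hp]; exact pv_sev_le_two p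

theorem pv_le_rank (patterns : List String) (p : String) (hp : p ∈ patterns) :
    pvSev p ≤ pvRank patterns :=
  (PySem.List.le_foldl_max (patterns.map pvSev) 0).2 (pvSev p) (List.mem_map.mpr ⟨p, hp, rfl⟩)

theorem pv_rank_cases (patterns : List String) :
    pvRank patterns = 0 ∨ ∃ p ∈ patterns, pvRank patterns = pvSev p := by
  rcases PySem.List.foldl_max_mem (patterns.map pvSev) 0 with h | h
  · exact Or.inl h
  · rcases List.mem_map.mp h with ⟨p, hp, hv⟩
    exact Or.inr ⟨p, hp, hv.symm⟩

-- ===== VERDICT (by name: the statement is the Claim_ definition above) =====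
theorem pattern_risk_level_spec : Claim_equal_pattern_risk_level := by
  intro patterns _
  unfold Spec_pattern_risk_level pattern_risk_level_alt
  rw [pv_rank_eq, pv_A_eq]
  by_cases hH : patterns.any pvHighB = true
  · -- some high-risk pattern: rank is exactly 2
    rcases List.any_eq_true.mp hH with ⟨p, hp, hHp⟩
    have h2 : pvSev p = 2 := by rw [pv_sev_cases p, if_pos hHp]
    have hge := pv_le_rank patterns p hp
    have hle := pv_rank_le_two patterns
    have hr : pvRank patterns = 2 := by omega
    rw [if_pos hH, hr]; rfl
  · have hHf : ∀ p ∈ patterns, pvHighB p = false := by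
      intro p hp
      by_contra hc
      exact hH (List.any_eq_true.mpr ⟨p, hp, by revert hc; cases pvHighB p <;> simp⟩)
    by_cases hM : patterns.any pvMedB = true
    · -- no high-risk, some medium-risk: rank is exactly 1
      rcases List.any_eq_true.mp hM with ⟨p, hp, hMp⟩
      have h1 : pvSev p = 1 := by
        rw [pv_sev_cases p, hHf p hp]; simp [hMp]
      have hge := pv_le_rank patterns p hp
      have hle : pvRank patterns ≤ 1 := by
        rcases pv_rank_cases patterns with h | ⟨q, hq, hv⟩
        · omega
        · rw [hv, pv_sev_cases q, hHf q hq]; simp; split_ifs <;> omega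
      have hr : pvRank patterns = 1 := by omega
      rw [if_neg hH, if_pos hM, hr]; rfl
    · -- no matching pattern at all: rank is 0
      have hMf : ∀ p ∈ patterns, pvMedB p = false := by
        intro p hp
        by_contra hc
        exact hM (List.any_eq_true.mpr ⟨p, hp, by revert hc; cases pvMedB p <;> simp⟩)
      have hr : pvRank patterns = 0 := by
        rcases pv_rank_cases patterns with h | ⟨q, hq, hv⟩
        · exact h
        · rw [hv, pv_sev_cases q, hHf q hq, hMf q hq]; simp
      rw [if_neg hH, if_neg hM, hr]; rfl
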